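-- pv_equiv track=rewrite | github.com/blacksmithalex/ege_computer_science | Отдельные варианты/Статград 27 апреля/26.py | Mgroups
-- ===== SOURCE A (Python) =====
-- def Mgroups(line):
--     '''выдает двумерный список, содержащий списки из двух элементов (начало и конец групп,
--     которые имеют максимальную длинну из единиц)'''
--     s = ''.join([str(x) for x in line])
--     Ml = max([len(x) for x in s.split('0')])
--     res = []
--     for i in range(len(s)):
--         if s[i: i + Ml] == '1' * Ml:
--             res.append([i, i + Ml - 1])
--     return res
-- ===== SOURCE B (Python) =====
-- def Mgroups(line):
--     '''Single linear pass over the digit string: collect the segments between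
--     '0' characters (start, length, all-ones flag), then report the all-ones
--     segments of maximal length.'''
--     s = ''.join([str(x) for x in line])
--     chunks = []
--     start, length, ones = 0, 0, True
--     for i, c in enumerate(s):
--         if c == '0':
--             chunks.append((start, length, ones))
--             start, length, ones = i + 1, 0, True
--         else:
--             length += 1
--             ones = ones and c == '1'
--     chunks.append((start, length, ones))
--     best = max(ln for (_, ln, _) in chunks)
--     if best == 0:
--         return []
--     return [[st, st + best - 1] for (st, ln, on) in chunks if ln == best and on]
-- ===== Notes on version B (the rewrite author's own statement) =====
-- stated objective: faster
-- what changed: A concatenates the digits, takes the max '0'-split segment length Ml, then re-slices and compares a fresh window of length Ml at every index (O(n*Ml)); B makes one linear pass collecting the '0'-separated segments with their start index, length and all-ones flag, and reports the all-ones segments of maximal length directly (O(n)).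
-- intended difference: On nonempty all-zero inputs A's Ml is 0 and its empty-window test matches at every index, so A returns one degenerate start/end pair per digit (end one before start); B returns the empty list, the intended answer when there is no group of ones. — e.g. on Mgroups([0]): A returns [[0, -1]], B returns []
import Mathlib
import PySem

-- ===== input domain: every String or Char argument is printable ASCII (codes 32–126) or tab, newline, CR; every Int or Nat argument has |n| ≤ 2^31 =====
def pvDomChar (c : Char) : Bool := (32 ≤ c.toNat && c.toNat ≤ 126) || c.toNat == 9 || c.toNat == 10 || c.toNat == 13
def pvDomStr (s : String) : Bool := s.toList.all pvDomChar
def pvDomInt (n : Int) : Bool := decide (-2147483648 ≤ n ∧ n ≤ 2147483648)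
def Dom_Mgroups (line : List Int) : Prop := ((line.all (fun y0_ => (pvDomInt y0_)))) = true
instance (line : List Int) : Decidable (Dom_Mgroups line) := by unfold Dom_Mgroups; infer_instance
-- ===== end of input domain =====

-- B replaces A's sliding-window re-scan (a fresh slice comparison at every index) by a single
-- linear pass that collects the '0'-separated segments once; on nonempty all-zero inputs A's
-- degenerate end-before-start pairs are replaced by the intended empty list (see D_Mgroups).

-- ===== PORT A =====
def Mgroups (line : List Int) : List (List Int) :=
  let s : List Char := PySem.Chars.join [] (line.map (fun x => PySem.Int.toChars x))
  let parts : List (List Char) := (PySem.Chars.split? s ['0']).getD []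
  let ml : Int :=
    match PySem.List.max? (parts.map (fun x => PySem.Chars.len x)) (fun y => y) with
    | some m => m
    | none => 0   -- unreachable: split of a string on '0' is never empty
  (PySem.List.pyRange 0 (PySem.List.len s) 1).foldl
    (fun res i =>
      if PySem.Chars.slice s (some i) (some (i + ml)) = PySem.List.pyRepeat ['1'] ml
      then res ++ [[i, i + ml - 1]]
      else res) []

-- ===== PORT B =====
def Mgroups_alt (line : List Int) : List (List Int) :=
  let s : List Char := PySem.Chars.join [] (line.map (fun x => PySem.Int.toChars x))
  let st := (PySem.List.enumerate s 0).foldl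
    (fun (acc : List (Int × Int × Bool) × Int × Int × Bool) ic =>
      if ic.2 == '0' then
        (acc.1 ++ [(acc.2.1, acc.2.2.1, acc.2.2.2)], ic.1 + 1, 0, true)
      else
        (acc.1, acc.2.1, acc.2.2.1 + 1, acc.2.2.2 && (ic.2 == '1')))
    ([], 0, 0, true)
  let chunks := st.1 ++ [(st.2.1, st.2.2.1, st.2.2.2)]
  let best : Int :=
    match PySem.List.max? (chunks.map (fun t => t.2.1)) (fun y => y) with
    | some b => b
    | none => 0   -- unreachable: chunks is never empty
  if best == 0 then []
  else (chunks.filter (fun t => t.2.1 == best && t.2.2)).map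
         (fun t => [t.1, t.1 + best - 1])

-- ===== PRECONDITION & SPEC =====
-- On nonempty all-zero inputs A returns one degenerate end-before-start pair per digit (an
-- artefact of slicing with Ml = 0); B returns the empty list, the intended answer.
def D_Mgroups (line : List Int) : Prop := line ≠ [] ∧ ∀ x ∈ line, x = 0
instance (line : List Int) : Decidable (D_Mgroups line) := by unfold D_Mgroups; infer_instance
def Spec_Mgroups (line : List Int) (out : List (List Int)) : Prop := ¬ D_Mgroups line → out = Mgroups_alt line
instance (line : List Int) (out : List (List Int)) : Decidable (Spec_Mgroups line out) := by unfold Spec_Mgroups; infer_instance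
def pvDiffWitness_Mgroups : List Int := [0]
def pvDiffWitnessOut_Mgroups : (List (List Int)) × (List (List Int)) := ([[0, -1]], [])

-- ===== CLAIM (what is proved, stated in full; the proofs are below) =====
def Claim_unchanged_Mgroups : Prop := ∀ (line : List Int), Dom_Mgroups line → Spec_Mgroups line (Mgroups line)
def Claim_changed_Mgroups : Prop := Dom_Mgroups (pvDiffWitness_Mgroups) ∧ D_Mgroups (pvDiffWitness_Mgroups) ∧ Mgroups (pvDiffWitness_Mgroups) = pvDiffWitnessOut_Mgroups.1 ∧ Mgroups_alt (pvDiffWitness_Mgroups) = pvDiffWitnessOut_Mgroups.2 ∧ pvDiffWitnessOut_Mgroups.1 ≠ pvDiffWitnessOut_Mgroups.2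
def Claim_exact_Mgroups : Prop := ∀ (line : List Int), Dom_Mgroups line → D_Mgroups line → Mgroups line ≠ Mgroups_alt line

-- ===== LEMMAS AND PROOFS =====

-- the shared digit string
def sline (line : List Int) : List Char :=
  PySem.Chars.join [] (line.map (fun x => PySem.Int.toChars x))

-- '0'-splitting, recursively
def mySplit : List Char → List (List Char)
  | [] => [[]]
  | c :: r => if c = '0' then [] :: mySplit r else (mySplit r).modifyHead (fun h => c :: h)

def posOf : Int → List (List Char) → List (Int × Int × Bool)
  | _, [] => []
  | p, ch :: t => (p, (ch.length : Int), ch.all (· == '1')) :: posOf (p + ch.length + 1) t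

theorem mySplit_ne_nil (cs : List Char) : mySplit cs ≠ [] := by
  cases cs with
  | nil => simp [mySplit]
  | cons c r =>
    simp only [mySplit]
    split
    · simp
    · have := mySplit_ne_nil r
      cases h : mySplit r with
      | nil => exact absurd h this
      | cons a t => simp [h]

theorem splitOn_go_eq (cs : List Char) : ∀ (fuel : Nat) (cur : List Char) (acc : List (List Char)),
    cs.length < fuel →
    PySem.Chars.splitOn.go ['0'] fuel cs cur acc
      = acc.reverse ++ (mySplit cs).modifyHead (fun h => cur.reverse ++ h) := by
  induction cs with
  | nil =>
    intro fuel cur acc hf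
    cases fuel with
    | zero => omega
    | succ f => simp [PySem.Chars.splitOn.go, mySplit]
  | cons c r ih =>
    intro fuel cur acc hf
    cases fuel with
    | zero => simp at hf
    | succ f =>
      by_cases hc : c = '0'
      · subst hc
        rw [show PySem.Chars.splitOn.go ['0'] (f+1) ('0' :: r) cur acc
              = PySem.Chars.splitOn.go ['0'] f r [] (cur.reverse :: acc) by
            simp [PySem.Chars.splitOn.go, List.isPrefixOf]]
        rw [ih f [] (cur.reverse :: acc) (by simpa using hf)]
        simp only [mySplit, if_pos rfl, List.reverse_cons, List.append_assoc,
          List.modifyHead_cons, List.singleton_append, List.nil_append]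
        cases mySplit r <;> simp
      · have hpre : (['0'].isPrefixOf (c :: r)) = false := by
          simp [List.isPrefixOf]; exact fun h => hc h.symm
        rw [show PySem.Chars.splitOn.go ['0'] (f+1) (c :: r) cur acc
              = PySem.Chars.splitOn.go ['0'] f r (c :: cur) acc by
            simp [PySem.Chars.splitOn.go, hpre]]
        rw [ih f (c :: cur) acc (by simpa using hf)]
        simp only [mySplit, if_neg hc]
        obtain ⟨a, t, h⟩ : ∃ a t, mySplit r = a :: t := by
          cases h : mySplit r with
          | nil => exact absurd h (mySplit_ne_nil r)
          | cons a t => exact ⟨a, t, rfl⟩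
        simp [h]

theorem splitOn_eq_mySplit (cs : List Char) :
    PySem.Chars.splitOn cs ['0'] = mySplit cs := by
  unfold PySem.Chars.splitOn
  rw [splitOn_go_eq cs (cs.length + 1) [] [] (by omega)]
  obtain ⟨a, t, h⟩ : ∃ a t, mySplit cs = a :: t := by
    cases h : mySplit cs with
    | nil => exact absurd h (mySplit_ne_nil cs)
    | cons a t => exact ⟨a, t, rfl⟩
  simp [h]

theorem intercalate_cons {α : Type} (s a : List α) (L : List (List α)) (h : L ≠ []) :
    List.intercalate s (a :: L) = a ++ s ++ List.intercalate s L := by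
  cases L with
  | nil => exact absurd rfl h
  | cons b t => simp [List.intercalate, List.intersperse]

theorem intercalate_cons_head {α : Type} (s ch : List α) (c : α) (t : List (List α)) :
    List.intercalate s ((c :: ch) :: t) = c :: List.intercalate s (ch :: t) := by
  cases t with
  | nil => simp [List.intercalate]
  | cons b u =>
    rw [intercalate_cons s (c :: ch) (b :: u) (by simp),
        intercalate_cons s ch (b :: u) (by simp)]
    simp

theorem intercalate_mySplit (cs : List Char) :
    List.intercalate ['0'] (mySplit cs) = cs := by
  induction cs with
  | nil => simp [mySplit, List.intercalate]
  | cons c r ih =>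
    by_cases hc : c = '0'
    · subst hc
      rw [show mySplit ('0' :: r) = [] :: mySplit r from by simp [mySplit]]
      rw [intercalate_cons ['0'] [] (mySplit r) (mySplit_ne_nil r)]
      simp [ih]
    · simp only [mySplit, if_neg hc]
      obtain ⟨a, t, h⟩ : ∃ a t, mySplit r = a :: t := by
        cases h : mySplit r with
        | nil => exact absurd h (mySplit_ne_nil r)
        | cons a t => exact ⟨a, t, rfl⟩
      rw [h] at ih ⊢
      simp only [List.modifyHead_cons]
      rw [intercalate_cons_head, ih]

theorem zero_not_mem_mySplit (cs : List Char) : ∀ ch ∈ mySplit cs, '0' ∉ ch := by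
  induction cs with
  | nil => intro ch h; simp [mySplit] at h; simp [h]
  | cons c r ih =>
    intro ch h
    by_cases hc : c = '0'
    · subst hc
      rw [show mySplit ('0' :: r) = [] :: mySplit r from by simp [mySplit]] at h
      rcases List.mem_cons.1 h with h | h
      · simp [h]
      · exact ih ch h
    · simp only [mySplit, if_neg hc] at h
      obtain ⟨a, t, ha⟩ : ∃ a t, mySplit r = a :: t := by
        cases ha : mySplit r with
        | nil => exact absurd ha (mySplit_ne_nil r)
        | cons a t => exact ⟨a, t, rfl⟩
      rw [ha] at h
      simp only [List.modifyHead_cons] at h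
      rcases List.mem_cons.1 h with h | h
      · subst h
        intro hm
        rcases List.mem_cons.1 hm with h0 | h0
        · exact hc h0.symm
        · exact ih a (by simp [ha]) h0
      · exact ih ch (by rw [ha]; exact List.mem_cons_of_mem _ h)

theorem mem_mySplit_of_ne_zero (cs : List Char) (c : Char) (hc : c ∈ cs) (h0 : c ≠ '0') :
    ∃ ch ∈ mySplit cs, c ∈ ch := by
  induction cs with
  | nil => simp at hc
  | cons a r ih =>
    by_cases ha : a = '0'
    · subst ha
      have hcr : c ∈ r := by
        rcases List.mem_cons.1 hc with h | h
        · exact absurd h h0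
        · exact h
      obtain ⟨ch, h1, h2⟩ := ih hcr
      exact ⟨ch, by rw [show mySplit ('0' :: r) = [] :: mySplit r from by simp [mySplit]]; exact List.mem_cons_of_mem _ h1, h2⟩
    · simp only [mySplit, if_neg ha]
      obtain ⟨b, t, hb⟩ : ∃ b t, mySplit r = b :: t := by
        cases hb : mySplit r with
        | nil => exact absurd hb (mySplit_ne_nil r)
        | cons b t => exact ⟨b, t, rfl⟩
      rw [hb]
      rcases List.mem_cons.1 hc with h | h
      · exact ⟨a :: b, by simp, by simp [h]⟩
      · obtain ⟨ch, h1, h2⟩ := ih h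
        rw [hb] at h1
        rcases List.mem_cons.1 h1 with h3 | h3
        · exact ⟨a :: b, by simp, by simp [h3 ▸ h2]⟩
        · exact ⟨ch, by simp [h3], h2⟩

theorem posOf_map_len (L : List (List Char)) : ∀ p : Int,
    (posOf p L).map (fun t => t.2.1) = L.map (fun ch => (ch.length : Int)) := by
  induction L with
  | nil => intro p; simp [posOf]
  | cons ch t ih => intro p; simp [posOf, ih]

theorem posOf_lb (L : List (List Char)) : ∀ (p : Int) (e : Int × Int × Bool),
    e ∈ posOf p L → p ≤ e.1 := by
  induction L with
  | nil => intro p e h; simp [posOf] at h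
  | cons ch t ih =>
    intro p e h
    simp only [posOf, List.mem_cons] at h
    rcases h with h | h
    · simp [h]
    · have := ih (p + ch.length + 1) e h
      have h0 : (0:Int) ≤ (ch.length : Int) := by positivity
      omega

theorem posOf_pairwise (L : List (List Char)) : ∀ p : Int,
    (posOf p L).Pairwise (fun a b => a.1 < b.1) := by
  induction L with
  | nil => intro p; simp [posOf]
  | cons ch t ih =>
    intro p
    simp only [posOf, List.pairwise_cons]
    refine ⟨fun e he => ?_, ih _⟩
    have := posOf_lb t (p + ch.length + 1) e he
    have h0 : (0:Int) ≤ (ch.length : Int) := by positivity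
    omega

def mergeFirst (st l0 : Int) (o0 : Bool) : List (Int × Int × Bool) → List (Int × Int × Bool)
  | [] => []
  | (_, l, o) :: t => (st, l0 + l, o0 && o) :: t

def bstep (acc : List (Int × Int × Bool) × Int × Int × Bool) (ic : Int × Char) :
    List (Int × Int × Bool) × Int × Int × Bool :=
  if ic.2 == '0' then
    (acc.1 ++ [(acc.2.1, acc.2.2.1, acc.2.2.2)], ic.1 + 1, 0, true)
  else
    (acc.1, acc.2.1, acc.2.2.1 + 1, acc.2.2.2 && (ic.2 == '1'))

def finChunks (r : List (Int × Int × Bool) × Int × Int × Bool) : List (Int × Int × Bool) :=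
  r.1 ++ [(r.2.1, r.2.2.1, r.2.2.2)]

theorem enumerate_cons {α : Type} (x : α) (xs : List α) (p : Int) :
    PySem.List.enumerate (x :: xs) p = (p, x) :: PySem.List.enumerate xs (p + 1) := rfl

theorem mergeFirst_posOf (p : Int) (L : List (List Char)) :
    mergeFirst p 0 true (posOf p L) = posOf p L := by
  cases L with
  | nil => simp [posOf, mergeFirst]
  | cons ch t => simp [posOf, mergeFirst]

theorem bfold (cs : List Char) : ∀ (p : Int) (chunks : List (Int × Int × Bool)) (start len : Int) (ones : Bool),
    finChunks (((PySem.List.enumerate cs p).foldl bstep (chunks, start, len, ones)))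
      = chunks ++ mergeFirst start len ones (posOf p (mySplit cs)) := by
  induction cs with
  | nil =>
    intro p chunks start len ones
    simp [PySem.List.enumerate, finChunks, mySplit, posOf, mergeFirst]
  | cons c r ih =>
    intro p chunks start len ones
    rw [enumerate_cons, List.foldl_cons]
    by_cases hc : c = '0'
    · subst hc
      rw [show bstep (chunks, start, len, ones) (p, '0')
            = (chunks ++ [(start, len, ones)], p + 1, 0, true) from rfl]
      rw [ih (p + 1) (chunks ++ [(start, len, ones)]) (p + 1) 0 true]
      rw [mergeFirst_posOf]
      rw [show mySplit ('0' :: r) = [] :: mySplit r from by simp [mySplit]]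
      rw [show posOf p ([] :: mySplit r) = (p, 0, true) :: posOf (p + 1) (mySplit r) from by
        simp [posOf]]
      rw [show mergeFirst start len ones ((p, (0:Int), true) :: posOf (p + 1) (mySplit r))
            = (start, len, ones) :: posOf (p + 1) (mySplit r) from by simp [mergeFirst]]
      simp
    · rw [show bstep (chunks, start, len, ones) (p, c)
            = (chunks, start, len + 1, ones && (c == '1')) from by
          simp [bstep]; intro h; exact absurd h hc]
      rw [ih (p + 1) chunks start (len + 1) (ones && (c == '1'))]
      obtain ⟨ch, t, hb⟩ : ∃ ch t, mySplit r = ch :: t := by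
        cases hb : mySplit r with
        | nil => exact absurd hb (mySplit_ne_nil r)
        | cons ch t => exact ⟨ch, t, rfl⟩
      rw [show mySplit (c :: r) = (c :: ch) :: t from by simp [mySplit, hc, hb]]
      rw [hb]
      simp only [posOf, mergeFirst, List.all_cons, List.length_cons]
      have h1 : len + 1 + (ch.length : Int) = len + ((ch.length : Nat) + 1 : Nat) := by push_cast; ring
      have h2 : p + 1 + (ch.length : Int) + 1 = p + ((ch.length : Nat) + 1 : Nat) + 1 := by push_cast; ring
      rw [Bool.and_assoc, h1, h2]

theorem window_single (ch : List Char) (i m : Nat) (hm : 1 ≤ m) (hlen : ch.length ≤ m) :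
    ((ch.drop i).take m = List.replicate m '1') ↔
      (i = 0 ∧ ch.length = m ∧ ch.all (· == '1') = true) := by
  constructor
  · intro h
    have hl := congrArg List.length h
    simp only [List.length_take, List.length_drop, List.length_replicate] at hl
    have hi : i = 0 := by omega
    have hcm : ch.length = m := by omega
    subst hi
    rw [List.drop_zero, ← hcm, List.take_length] at h
    refine ⟨rfl, hcm, ?_⟩
    simp only [List.all_eq_true, beq_iff_eq]
    intro c hc
    rw [h] at hc
    exact (List.eq_of_mem_replicate hc)
  · rintro ⟨hi, hcm, hall⟩
    subst hi
    rw [List.drop_zero]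
    have hrep : ch = List.replicate ch.length '1' := by
      apply List.eq_replicate_of_mem
      intro c hc
      simp only [List.all_eq_true, beq_iff_eq] at hall
      exact hall c hc
    rw [hrep, hcm, List.take_replicate]
    simp

theorem windowW (L : List (List Char)) : ∀ (p i m : Nat), 1 ≤ m →
    (∀ ch ∈ L, '0' ∉ ch) → (∀ ch ∈ L, ch.length ≤ m) →
    ((((p:Int) + (i:Int), (m:Int), true) ∈ posOf (p:Int) L) ↔
      ((List.intercalate ['0'] L).drop i).take m = List.replicate m '1') := by
  induction L with
  | nil =>
    intro p i m hm _ _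
    simp only [posOf, List.not_mem_nil, false_iff]
    rw [show List.intercalate ['0'] ([] : List (List Char)) = [] from rfl]
    simp only [List.drop_nil, List.take_nil]
    intro h
    have := congrArg List.length h
    simp at this
    omega
  | cons ch t ih =>
    intro p i m hm hz hlen
    have hchm : ch.length ≤ m := hlen ch (by simp)
    cases t with
    | nil =>
      rw [show List.intercalate ['0'] [ch] = ch from by simp [List.intercalate]]
      rw [show posOf (p:Int) [ch] = [((p:Int), (ch.length : Int), ch.all (· == '1'))] from rfl]
      rw [window_single ch i m hm hchm]
      simp only [List.mem_singleton, Prod.mk.injEq]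
      constructor
      · rintro ⟨h1, h2, h3⟩
        exact ⟨by omega, by exact_mod_cast h2.symm, h3.symm⟩
      · rintro ⟨h1, h2, h3⟩
        exact ⟨by omega, by exact_mod_cast h2.symm, h3.symm⟩
    | cons ch2 t2 =>
      rw [intercalate_cons ['0'] ch (ch2 :: t2) (by simp)]
      rw [show posOf (p:Int) (ch :: ch2 :: t2)
            = ((p:Int), (ch.length : Int), ch.all (· == '1'))
              :: posOf ((p:Int) + ch.length + 1) (ch2 :: t2) from rfl]
      rw [List.mem_cons]
      set cs' := List.intercalate ['0'] (ch2 :: t2) with hcs'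
      by_cases hcase1 : ch.length < i
      · -- window starts strictly after the separating '0'
        have hdrop : ((ch ++ ['0'] ++ cs').drop i) = cs'.drop (i - ch.length - 1) := by
          rw [List.append_assoc, List.drop_append]
          rw [show ch.drop i = [] from List.drop_eq_nil_of_le (by omega)]
          rw [List.nil_append, List.drop_append]
          rw [show (['0'] : List Char).drop (i - ch.length) = [] from
            List.drop_eq_nil_of_le (by simp; omega)]
          rw [List.nil_append]
          simp
        rw [hdrop]
        have htail : (((p:Int) + (i:Int), (m:Int), true) ∈ posOf ((p:Int) + ch.length + 1) (ch2 :: t2))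
            ↔ (cs'.drop (i - ch.length - 1)).take m = List.replicate m '1' := by
          have hmain := ih (p + ch.length + 1) (i - ch.length - 1) m hm
            (fun c hc => hz c (by simp [hc]))
            (fun c hc => hlen c (by simp [hc]))
          rw [show (((p + ch.length + 1 : Nat) : Int) + ((i - ch.length - 1 : Nat) : Int))
                = (p:Int) + (i:Int) from by push_cast; omega] at hmain
          rw [show (((p + ch.length + 1 : Nat) : Int)) = (p:Int) + ch.length + 1 from by push_cast; ring] at hmain
          exact hmain
        constructor
        · rintro (h | h)
          · exfalso
            have := congrArg Prod.fst h
            simp at this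
            omega
          · exact htail.1 h
        · intro h
          exact Or.inr (htail.2 h)
      · -- the window starts inside ch (i ≤ ch.length)
        have hle : i ≤ ch.length := by omega
        have hdropch : ((ch ++ ['0'] ++ cs').drop i) = ch.drop i ++ ('0' :: cs') := by
          rw [List.append_assoc, List.drop_append_of_le_length hle]
          simp
        by_cases hcase2 : i + m ≤ ch.length
        · -- window entirely inside ch
          have htake : ((ch ++ ['0'] ++ cs').drop i).take m = (ch.drop i).take m := by
            rw [hdropch, List.take_append_of_le_length (by simp; omega)]
          rw [htake, window_single ch i m hm hchm]
          constructor
          · rintro (h | h)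
            · simp only [Prod.mk.injEq] at h
              obtain ⟨h1, h2, h3⟩ := h
              refine ⟨by omega, by exact_mod_cast h2.symm, h3.symm⟩
            · exfalso
              have := posOf_lb (ch2 :: t2) ((p:Int) + ch.length + 1) _ h
              simp only at this
              omega
          · rintro ⟨h1, h2, h3⟩
            left
            subst h1
            simp only [Prod.mk.injEq]
            refine ⟨by omega, by exact_mod_cast h2.symm, h3.symm⟩
        · -- the window covers the separating '0': impossible
          have h0idx : (ch.length - i) < m := by omega
          constructor
          · rintro (h | h)
            · simp only [Prod.mk.injEq] at h
              obtain ⟨h1, h2, h3⟩ := h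
              omega
            · have := posOf_lb (ch2 :: t2) ((p:Int) + ch.length + 1) _ h
              simp only at this
              omega
          · intro h
            exfalso
            have hg := congrArg (fun l => l[(ch.length - i)]?) h
            simp only at hg
            rw [List.getElem?_take_of_lt h0idx, hdropch] at hg
            rw [List.getElem?_append_right (by simp)] at hg
            simp only [List.length_drop] at hg
            rw [show ch.length - i - (ch.length - i) = 0 from by omega] at hg
            rw [List.getElem?_replicate_of_lt h0idx] at hg
            simp at hg

-- A's maximal-segment length, as a function of the digit string
def amax (s : List Char) : Int :=
  match PySem.List.max?
      ((((PySem.Chars.split? s ['0']).getD []).map (fun x => PySem.Chars.len x))) (fun y => y) with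
  | some m => m
  | none => 0

def Abody (s : List Char) : List (List Int) :=
  (PySem.List.pyRange 0 (PySem.List.len s) 1).foldl
    (fun res i =>
      if PySem.Chars.slice s (some i) (some (i + amax s)) = PySem.List.pyRepeat ['1'] (amax s)
      then res ++ [[i, i + amax s - 1]]
      else res) []

def bchunks (s : List Char) : List (Int × Int × Bool) :=
  finChunks ((PySem.List.enumerate s 0).foldl bstep ([], 0, 0, true))

def bbest (s : List Char) : Int :=
  match PySem.List.max? ((bchunks s).map (fun t => t.2.1)) (fun y => y) with
  | some b => b
  | none => 0

def Bbody (s : List Char) : List (List Int) :=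
  if bbest s == 0 then []
  else ((bchunks s).filter (fun t => t.2.1 == bbest s && t.2.2)).map
         (fun t => [t.1, t.1 + bbest s - 1])

theorem Mgroups_eq_Abody (line : List Int) : Mgroups line = Abody (sline line) := rfl
theorem Mgroups_alt_eq_Bbody (line : List Int) : Mgroups_alt line = Bbody (sline line) := rfl

theorem bchunks_eq (s : List Char) : bchunks s = posOf 0 (mySplit s) := by
  unfold bchunks
  rw [bfold]
  rw [mergeFirst_posOf 0 (mySplit s)]
  simp

theorem parts_eq (s : List Char) : (PySem.Chars.split? s ['0']).getD [] = mySplit s := by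
  simp [PySem.Chars.split?, splitOn_eq_mySplit]

theorem foldl_append_ite {α β : Type} (p : α → Prop) [DecidablePred p] (f : α → β) :
    ∀ (l : List α) (acc : List β),
      l.foldl (fun acc x => if p x then acc ++ [f x] else acc) acc
        = acc ++ (l.filter (fun x => decide (p x))).map f := by
  intro l
  induction l with
  | nil => intro acc; simp
  | cons a t ih =>
    intro acc
    by_cases h : p a
    · simp [h, ih]
    · simp [h, ih]

theorem pyRange_zero_natCast (n : Nat) :
    PySem.List.pyRange 0 (n : Int) 1 = List.map (fun k : Nat => (k : Int)) (List.range n) := by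
  rw [PySem.List.pyRange_of_pos 0 (n : Int) (by norm_num)]
  rcases Nat.eq_zero_or_pos n with h | h
  · subst h; simp
  · rw [if_pos (by exact_mod_cast h)]
    simp

theorem eq_of_pairwise_lt_mem : ∀ (l1 l2 : List Int), l1.Pairwise (· < ·) → l2.Pairwise (· < ·) →
    (∀ x, x ∈ l1 ↔ x ∈ l2) → l1 = l2 := by
  intro l1
  induction l1 with
  | nil =>
    intro l2 _ _ hm
    cases l2 with
    | nil => rfl
    | cons b t2 => exact absurd ((hm b).2 (by simp)) (by simp)
  | cons a t1 ih =>
    intro l2 h1 h2 hm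
    cases l2 with
    | nil => exact absurd ((hm a).1 (by simp)) (by simp)
    | cons b t2 =>
      have hab : a = b := by
        rcases List.mem_cons.1 ((hm a).1 (by simp)) with h | h
        · exact h
        · rcases List.mem_cons.1 ((hm b).2 (by simp)) with h' | h'
          · exact h'.symm
          · have hba := (List.pairwise_cons.1 h2).1 a h
            have hab := (List.pairwise_cons.1 h1).1 b h'
            omega
      subst hab
      congr 1
      apply ih t2 (List.pairwise_cons.1 h1).2 (List.pairwise_cons.1 h2).2
      intro x
      constructor
      · intro hx
        have hax := (List.pairwise_cons.1 h1).1 x hx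
        rcases List.mem_cons.1 ((hm x).1 (List.mem_cons_of_mem _ hx)) with h | h
        · omega
        · exact h
      · intro hx
        have hax := (List.pairwise_cons.1 h2).1 x hx
        rcases List.mem_cons.1 ((hm x).2 (List.mem_cons_of_mem _ hx)) with h | h
        · omega
        · exact h

theorem body_eq (s : List Char) (hex : ∃ c ∈ s, c ≠ '0') : Abody s = Bbody s := by
  obtain ⟨c0, hc0s, hc0⟩ := hex
  have hzero := zero_not_mem_mySplit s
  have hlens : ((PySem.Chars.split? s ['0']).getD []).map (fun x => PySem.Chars.len x)
      = (mySplit s).map (fun ch => (ch.length : Int)) := by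
    rw [parts_eq]
    simp [PySem.Chars.len_eq]
  obtain ⟨M, hM⟩ : ∃ M, PySem.List.max? ((mySplit s).map (fun ch => (ch.length : Int)))
      (fun y => y) = some M := by
    cases h : PySem.List.max? ((mySplit s).map (fun ch => (ch.length : Int))) (fun y => y) with
    | some M => exact ⟨M, rfl⟩
    | none =>
      exfalso
      have hnil := (PySem.List.max?_eq_none_iff _ _).1 h
      exact mySplit_ne_nil s (List.map_eq_nil_iff.1 hnil)
  have hamax : amax s = M := by unfold amax; rw [hlens, hM]
  have hub : ∀ ch ∈ mySplit s, (ch.length : Int) ≤ M := by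
    intro ch hch
    exact PySem.List.max?_isMax hM ((ch.length : Int)) (List.mem_map_of_mem hch)
  have hM1 : 1 ≤ M := by
    obtain ⟨ch0, hch0, hmem⟩ := mem_mySplit_of_ne_zero s c0 hc0s hc0
    have h1 : 0 < ch0.length := List.length_pos_of_mem hmem
    have h2 := hub ch0 hch0
    omega
  set m : Nat := M.toNat with hmdef
  have hMm : (m : Int) = M := by omega
  have hm1 : 1 ≤ m := by omega
  have hlenle : ∀ ch ∈ mySplit s, ch.length ≤ m := by
    intro ch hch
    have := hub ch hch
    omega
  have hbbest : bbest s = M := by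
    unfold bbest
    rw [bchunks_eq, posOf_map_len, hM]
  -- window-condition bridge
  have hcond : ∀ k : Nat,
      (PySem.Chars.slice s (some (k:Int)) (some ((k:Int) + M)) = PySem.List.pyRepeat ['1'] M)
        ↔ ((s.drop k).take m = List.replicate m '1') := by
    intro k
    rw [← hMm]
    rw [show PySem.Chars.slice s (some (k:Int)) (some ((k:Int) + (m:Int)))
          = (s.drop k).take m from by
      rw [PySem.Chars.slice_eq_listSlice]
      exact PySem.List.slice_natCast_add s k m]
    rw [PySem.List.pyRepeat_singleton]
    simp
  have hwin : ∀ k : Nat,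
      (((k:Int), (m:Int), true) ∈ posOf 0 (mySplit s))
        ↔ ((s.drop k).take m = List.replicate m '1') := by
    intro k
    have := windowW (mySplit s) 0 k m hm1 hzero hlenle
    rw [intercalate_mySplit] at this
    simpa using this
  -- the two result lists
  have hA : Abody s = ((List.map (fun k : Nat => (k : Int)) (List.range s.length)).filter
      (fun i => decide (PySem.Chars.slice s (some i) (some (i + M)) = PySem.List.pyRepeat ['1'] M))).map
        (fun i => [i, i + M - 1]) := by
    unfold Abody
    simp only [hamax]
    rw [show PySem.List.len s = (s.length : Int) from by simp [PySem.List.len_eq]]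
    rw [pyRange_zero_natCast]
    rw [foldl_append_ite
      (fun i => PySem.Chars.slice s (some i) (some (i + M)) = PySem.List.pyRepeat ['1'] M)
      (fun i => [i, i + M - 1])]
    simp
  have hB : Bbody s = (((posOf 0 (mySplit s)).filter (fun t => t.2.1 == M && t.2.2)).map
      (fun t => [t.1, t.1 + M - 1])) := by
    unfold Bbody
    simp only [hbbest, bchunks_eq]
    rw [if_neg (by simp; omega)]
  -- the filtered index lists agree
  have hkey : (List.map (fun k : Nat => (k : Int)) (List.range s.length)).filter
      (fun i => decide (PySem.Chars.slice s (some i) (some (i + M)) = PySem.List.pyRepeat ['1'] M))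
      = ((posOf 0 (mySplit s)).filter (fun t => t.2.1 == M && t.2.2)).map (fun t => t.1) := by
    apply eq_of_pairwise_lt_mem
    · apply List.Pairwise.filter
      refine List.pairwise_map.2 (List.pairwise_lt_range.imp ?_)
      intro a b h
      exact_mod_cast h
    · apply List.pairwise_map.2
      exact ((posOf_pairwise (mySplit s) 0).filter _).imp (fun h => h)
    · intro x
      constructor
      · intro hx
        obtain ⟨hx1, hx2⟩ := List.mem_filter.1 hx
        simp only [List.mem_map, List.mem_range] at hx1
        obtain ⟨k, hk, rfl⟩ := hx1
        have hc := (hcond k).1 (of_decide_eq_true hx2)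
        have hmem := (hwin k).2 hc
        apply List.mem_map.2
        refine ⟨((k:Int), (m:Int), true), List.mem_filter.2 ⟨hmem, ?_⟩, rfl⟩
        simp [hMm]
      · intro hx
        obtain ⟨t, htf, ht1⟩ := List.mem_map.1 hx
        obtain ⟨htmem, htq⟩ := List.mem_filter.1 htf
        simp only [Bool.and_eq_true, beq_iff_eq] at htq
        have hx0 : (0:Int) ≤ x := by
          have := posOf_lb (mySplit s) 0 t htmem
          omega
        set k : Nat := x.toNat with hkdef
        have hxk : (k:Int) = x := by omega
        have ht : t = ((k:Int), (m:Int), true) := by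
          obtain ⟨t1, t2, t3⟩ := t
          simp only at ht1 htq
          simp only [Prod.mk.injEq]
          exact ⟨by omega, by omega, htq.2⟩
        rw [ht] at htmem
        have hc := (hwin k).1 htmem
        have hklt : k < s.length := by
          have hl := congrArg List.length hc
          simp only [List.length_take, List.length_drop, List.length_replicate] at hl
          omega
        apply List.mem_filter.2
        constructor
        · simp only [List.mem_map, List.mem_range]
          exact ⟨k, hklt, hxk⟩
        · rw [← hxk]
          exact decide_eq_true ((hcond k).2 hc)
  rw [hA, hB, hkey, List.map_map]
  rfl

theorem toDigits_all_zero : ∀ n : Nat, (∀ c ∈ Nat.toDigits 10 n, c = '0') → n = 0 := by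
  intro n
  induction n using Nat.strong_induction_on with
  | _ n ih =>
    intro h
    rw [Nat.toDigits_eq_if (by norm_num)] at h
    by_cases hn : n < 10
    · rw [if_pos hn] at h
      have := h (Nat.digitChar n) (by simp)
      interval_cases n <;> first | rfl | exact absurd this (by decide)
    · exfalso
      rw [if_neg hn] at h
      have h10 : n / 10 = 0 := by
        apply ih (n / 10) (by omega)
        intro c hc
        exact h c (List.mem_append_left _ hc)
      omega

theorem toChars_has_ne_zero {x : Int} (hx : x ≠ 0) :
    ∃ c ∈ PySem.Int.toChars x, c ≠ '0' := by
  by_contra hall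
  push_neg at hall
  unfold PySem.Int.toChars at hall
  by_cases hneg : x < 0
  · rw [if_pos hneg] at hall
    have := hall '-' (by simp)
    simp at this
  · rw [if_neg hneg] at hall
    have h0 := toDigits_all_zero x.toNat hall
    omega

theorem intercalate_nil_eq_flatten {α : Type} : ∀ (l : List (List α)),
    List.intercalate ([] : List α) l = l.flatten := by
  intro l
  induction l with
  | nil => rfl
  | cons a t ih =>
    cases t with
    | nil => simp [List.intercalate]
    | cons b u =>
      rw [intercalate_cons [] a (b :: u) (by simp), ih]
      simp

theorem mem_sline {line : List Int} {x : Int} {c : Char}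
    (hx : x ∈ line) (hc : c ∈ PySem.Int.toChars x) : c ∈ sline line := by
  unfold sline PySem.Chars.join
  rw [show ([] : List Char).intercalate (line.map fun x => PySem.Int.toChars x)
        = List.intercalate [] (line.map fun x => PySem.Int.toChars x) from rfl]
  rw [intercalate_nil_eq_flatten]
  exact List.mem_flatten.2 ⟨_, List.mem_map_of_mem hx, hc⟩

theorem sline_zeros (line : List Int) (h : ∀ x ∈ line, x = 0) :
    sline line = List.replicate line.length '0' := by
  unfold sline PySem.Chars.join
  rw [show ([] : List Char).intercalate (line.map fun x => PySem.Int.toChars x)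
        = List.intercalate [] (line.map fun x => PySem.Int.toChars x) from rfl]
  rw [intercalate_nil_eq_flatten]
  induction line with
  | nil => simp
  | cons a t ih =>
    have ha : a = 0 := h a (by simp)
    subst ha
    simp only [List.map_cons, List.flatten_cons, List.length_cons]
    rw [show PySem.Int.toChars 0 = ['0'] from rfl]
    rw [ih (fun x hx => h x (by simp [hx]))]
    simp [List.replicate_succ]

theorem mySplit_replicate_zero : ∀ n : Nat,
    mySplit (List.replicate n '0') = List.replicate (n + 1) ([] : List Char) := by
  intro n
  induction n with
  | zero => simp [mySplit]
  | succ k ih =>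
    rw [List.replicate_succ]
    rw [show mySplit ('0' :: List.replicate k '0') = [] :: mySplit (List.replicate k '0') from by
      simp [mySplit]]
    rw [ih]
    simp [List.replicate_succ]

theorem foldl_max_zeros : ∀ k : Nat, (List.replicate k (0:Int)).foldl max 0 = 0 := by
  intro k
  induction k with
  | zero => simp
  | succ j ih => rw [List.replicate_succ, List.foldl_cons]; simpa using ih

theorem max?_zeros (k : Nat) :
    PySem.List.max? (List.replicate (k + 1) (0:Int)) (fun y => y) = some 0 := by
  rw [List.replicate_succ, PySem.List.max?_id_cons, foldl_max_zeros]

theorem slice_self_nil (s : List Char) (i : Int) :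
    PySem.Chars.slice s (some i) (some i) = [] := by
  rw [PySem.Chars.slice_eq_listSlice]
  apply List.eq_nil_of_length_eq_zero
  rw [PySem.List.length_slice]
  omega

theorem Mgroups_all_zero_len (line : List Int) (h0 : ∀ x ∈ line, x = 0) :
    (Mgroups line).length = line.length := by
  rw [Mgroups_eq_Abody, sline_zeros line h0]
  set n := line.length with hn
  unfold Abody
  have hml : amax (List.replicate n '0') = 0 := by
    unfold amax
    rw [parts_eq, mySplit_replicate_zero]
    rw [List.map_replicate]
    rw [show PySem.Chars.len ([] : List Char) = 0 from rfl]
    rw [max?_zeros n]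
  simp only [hml]
  rw [show PySem.List.len (List.replicate n '0') = (n:Int) from by simp [PySem.List.len_eq]]
  rw [pyRange_zero_natCast]
  rw [foldl_append_ite
    (fun i => PySem.Chars.slice (List.replicate n '0') (some i) (some (i + 0))
        = PySem.List.pyRepeat ['1'] 0)
    (fun i => [i, i + 0 - 1])]
  rw [List.filter_eq_self.2 (fun a _ => decide_eq_true (by
    rw [add_zero, slice_self_nil]
    rfl))]
  simp

theorem Mgroups_alt_all_zero (line : List Int) (h0 : ∀ x ∈ line, x = 0) :
    Mgroups_alt line = [] := by
  rw [Mgroups_alt_eq_Bbody, sline_zeros line h0]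
  set n := line.length with hn
  unfold Bbody
  have hbb : bbest (List.replicate n '0') = 0 := by
    unfold bbest
    rw [bchunks_eq, posOf_map_len, mySplit_replicate_zero]
    rw [List.map_replicate]
    rw [show ((([] : List Char).length : Int)) = 0 from rfl]
    rw [max?_zeros n]
  rw [hbb]
  simp

-- ===== VERDICT (by name: the statement is the Claim_ definition above) =====
theorem Mgroups_spec : Claim_unchanged_Mgroups := by
  intro line _dom hnD
  by_cases hnil : line = []
  · subst hnil
    decide
  · have hx : ∃ x ∈ line, x ≠ 0 := by
      by_contra hall
      push_neg at hall
      exact hnD ⟨hnil, hall⟩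
    obtain ⟨x, hxline, hx0⟩ := hx
    obtain ⟨c, hc, hc0⟩ := toChars_has_ne_zero hx0
    rw [Mgroups_eq_Abody, Mgroups_alt_eq_Bbody]
    exact body_eq _ ⟨c, mem_sline hxline hc, hc0⟩

theorem Mgroups_changed : Claim_changed_Mgroups := by
  unfold Claim_changed_Mgroups; decide

theorem Mgroups_tight : Claim_exact_Mgroups := by
  intro line _dom hD heq
  obtain ⟨hnil, hzero⟩ := hD
  have hA := Mgroups_all_zero_len line hzero
  rw [heq, Mgroups_alt_all_zero line hzero] at hA
  have : line.length ≠ 0 := fun h => hnil (List.eq_nil_of_length_eq_zero h)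
  simp at hA
  omega
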